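-- pv_equiv track=rewrite | github.com/sonyeseul63/Algo_study | 프로그래머스/2/42626. 더 맵게/더 맵게.py | solution
-- ===== SOURCE A (Python) =====
-- import heapq
--
-- def solution(scoville, K):
--     answer = 0
--     heapq.heapify(scoville)
--     while scoville[0] < K:
--         if len(scoville) < 2:
--             return -1
--         f1 = heapq.heappop(scoville)
--         f2 = heapq.heappop(scoville)
--         mix = f1 + (f2 * 2)
--         if mix == 0:
--             return -1
--         else:
--             heapq.heappush(scoville, mix)
--             answer += 1
--     return answer
-- ===== SOURCE B (Python) =====
-- def solution(scoville, K):
--     # Two-queue technique: sort once, then keep a FIFO queue of produced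
--     # mixes (which come out in nondecreasing order), so each step pops the
--     # two smallest in O(1) from the two queue fronts -- no heap, no
--     # re-insertion.  Does not mutate the caller's list (A heapifies it in
--     # place); the return value is the same.
--     q = sorted(scoville)
--     m = []          # produced mixes, consumed from the front
--     qi = mi = 0     # front pointers
--     answer = 0
--
--     def pop_smallest():
--         nonlocal qi, mi
--         if qi < len(q) and (mi >= len(m) or q[qi] <= m[mi]):
--             qi += 1
--             return q[qi - 1]
--         mi += 1
--         return m[mi - 1]
--
--     while True:
--         if qi < len(q) and (mi >= len(m) or q[qi] <= m[mi]):
--             cur = q[qi]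
--         else:
--             cur = m[mi]
--         if cur >= K:
--             return answer
--         if (len(q) - qi) + (len(m) - mi) < 2:
--             return -1
--         f1 = pop_smallest()
--         f2 = pop_smallest()
--         mix = f1 + f2 * 2
--         if mix == 0:
--             return -1
--         m.append(mix)
--         answer += 1
-- ===== Notes on version B (the rewrite author's own statement) =====
-- stated objective: alternative
-- what changed: Replaces the binary min-heap by the two-queue technique: sort once, then keep produced mixes in a FIFO queue (they come out in nondecreasing order, proved via a certificate invariant), so each step pops the two smallest from the two queue fronts in O(1) with no heap operations; A heapifies the caller's list in place, B leaves it unmutated (return value is the same).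
import Mathlib
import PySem

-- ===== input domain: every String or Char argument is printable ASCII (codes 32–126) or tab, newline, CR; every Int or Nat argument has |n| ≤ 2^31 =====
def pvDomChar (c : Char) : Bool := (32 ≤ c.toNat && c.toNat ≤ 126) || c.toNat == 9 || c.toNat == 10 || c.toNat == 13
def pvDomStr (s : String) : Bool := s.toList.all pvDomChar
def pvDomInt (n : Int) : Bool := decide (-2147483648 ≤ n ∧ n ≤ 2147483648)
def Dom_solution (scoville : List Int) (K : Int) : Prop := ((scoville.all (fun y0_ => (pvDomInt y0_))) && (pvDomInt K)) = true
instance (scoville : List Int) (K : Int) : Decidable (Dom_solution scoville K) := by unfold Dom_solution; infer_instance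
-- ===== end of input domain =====

-- B replaces A's binary min-heap by the two-queue technique: sort once, then a
-- FIFO queue of produced mixes (appended in nondecreasing order), so each step
-- pops the two smallest from the two queue fronts in O(1) — no heap and no
-- re-insertion.  Return values agree; note A heapifies the caller's list in
-- place while B leaves it unmutated (the equivalence is about the return value).

-- ===== PORT A =====
-- heapq is ported by its library contract on int heaps: after heapify the root
-- scoville[0] is the minimum, heappop removes and returns the minimum, heappush
-- adds an element.  The heap is kept as the multiset of its elements (exact for
-- the return value, which depends only on the popped minima).
def pvHeappop (h : List Int) : Option (Int × List Int) :=
  match PySem.List.min? h (fun x => x) with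
  | none => none
  | some m => some (m, h.erase m)

-- the while loop; fuel = current length (each iteration shrinks the heap by 1).
def pvLoopA : Nat → List Int → Int → Int → Int
  | 0, _, _, answer => answer
  | n + 1, h, K, answer =>
    match pvHeappop h with
    | none => answer            -- empty heap: unreachable under Pre_solution
    | some (f1, h1) =>
      if f1 < K then             -- while scoville[0] < K
        if h.length < 2 then -1
        else
          match pvHeappop h1 with
          | none => -1           -- unreachable: h1 nonempty when h.length ≥ 2
          | some (f2, h2) =>
            let mix := f1 + f2 * 2
            if mix = 0 then -1
            else pvLoopA n (h2 ++ [mix]) K (answer + 1)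
      else answer

def solution (scoville : List Int) (K : Int) : Int :=
  pvLoopA scoville.length scoville K 0

-- ===== PORT B =====
-- Source B consumes the two queues through front pointers qi/mi; the port keeps the
-- unconsumed suffixes as lists (the same values in the same order).
-- pop_smallest / the front-minimum test: prefer q's front on ties, as Source B does.
def pvPopMin (q m : List Int) : Option (Int × List Int × List Int) :=
  match q, m with
  | [], [] => none
  | x :: q', [] => some (x, q', [])
  | [], y :: m' => some (y, [], m')
  | x :: q', y :: m' => if x ≤ y then some (x, q', y :: m') else some (y, x :: q', m')

-- the while-True loop; fuel = pool size (each iteration shrinks the pool by 1).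
def pvLoopB : Nat → List Int → List Int → Int → Int → Int
  | 0, _, _, _, answer => answer
  | n + 1, q, m, K, answer =>
    match pvPopMin q m with
    | none => answer            -- empty pool: unreachable under Pre_solution
    | some (f1, q1, m1) =>
      if f1 < K then             -- cur < K
        if q.length + m.length < 2 then -1
        else
          match pvPopMin q1 m1 with
          | none => -1           -- unreachable when the pool has ≥ 2 elements
          | some (f2, q2, m2) =>
            let mix := f1 + f2 * 2
            if mix = 0 then -1
            else pvLoopB n q2 (m2 ++ [mix]) K (answer + 1)
      else answer

def solution_alt (scoville : List Int) (K : Int) : Int :=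
  pvLoopB scoville.length (PySem.List.sorted scoville (fun x => x) false) [] K 0

-- ===== PRECONDITION & SPEC =====
-- Pre_ excludes only the empty list, on which A raises IndexError (scoville[0]).
def Pre_solution (scoville : List Int) (K : Int) : Prop := scoville ≠ []
instance (scoville : List Int) (K : Int) : Decidable (Pre_solution scoville K) := by unfold Pre_solution; infer_instance
def pvWitness_solution : List Int × Int := ([1, 2, 3, 9, 10, 12], 7)

def Spec_solution (scoville : List Int) (K : Int) (out : Int) : Prop := out = solution_alt scoville K
instance (scoville : List Int) (K : Int) (out : Int) : Decidable (Spec_solution scoville K out) := by unfold Spec_solution; infer_instance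

-- ===== CLAIM (what is proved, stated in full; the proofs are below) =====
def Claim_equal_solution : Prop := ∀ (scoville : List Int) (K : Int), Dom_solution scoville K → Pre_solution scoville K → Spec_solution scoville K (solution scoville K)

-- ===== LEMMAS AND PROOFS =====

-- Certificate that the mix queue m stays nondecreasing: every L in m was built
-- as x + 2y where y bounded everything then available (q and the part of m in
-- front of L), so every future mix is ≥ 3y ≥ L.
def Cert (avail : List Int) : List Int → Prop
  | [] => True
  | L :: rest => (∃ y, L ≤ 3 * y ∧ ∀ z ∈ avail, y ≤ z) ∧ Cert (L :: avail) rest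

theorem Cert_mono (avail avail' : List Int) (m : List Int)
    (hsub : ∀ z ∈ avail', z ∈ avail) (h : Cert avail m) : Cert avail' m := by
  induction m generalizing avail avail' with
  | nil => trivial
  | cons L rest ih =>
    obtain ⟨⟨y, hy, hall⟩, hrest⟩ := h
    exact ⟨⟨y, hy, fun z hz => hall z (hsub z hz)⟩,
      ih (L :: avail) (L :: avail') (by
        intro z hz
        rcases List.mem_cons.1 hz with h | h
        · exact h ▸ List.mem_cons_self
        · exact List.mem_cons_of_mem _ (hsub z h)) hrest⟩

theorem Cert_append_one (avail m : List Int) (M y : Int)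
    (h : Cert avail m) (hy : M ≤ 3 * y)
    (ha : ∀ z ∈ avail, y ≤ z) (hm : ∀ z ∈ m, y ≤ z) :
    Cert avail (m ++ [M]) := by
  induction m generalizing avail with
  | nil => exact ⟨⟨y, hy, ha⟩, trivial⟩
  | cons L rest ih =>
    obtain ⟨c, hrest⟩ := h
    refine ⟨c, ih (L :: avail) hrest ?_ ?_⟩
    · intro z hz
      rcases List.mem_cons.1 hz with h | h
      · exact h ▸ hm L List.mem_cons_self
      · exact ha z h
    · intro z hz
      exact hm z (List.mem_cons_of_mem _ hz)

theorem cert_split (avail pre post : List Int) (L : Int)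
    (h : Cert avail (pre ++ L :: post)) :
    ∃ y, L ≤ 3 * y ∧ (∀ z ∈ avail, y ≤ z) ∧ (∀ z ∈ pre, y ≤ z) := by
  induction pre generalizing avail with
  | nil =>
    obtain ⟨⟨y, hy, hall⟩, _⟩ := h
    exact ⟨y, hy, hall, by intro z hz; cases hz⟩
  | cons p pre' ih =>
    obtain ⟨_, hrest⟩ := h
    obtain ⟨y, hy, hall, hpre⟩ := ih (p :: avail) hrest
    refine ⟨y, hy, fun z hz => hall z (List.mem_cons_of_mem _ hz), ?_⟩
    intro z hz
    rcases List.mem_cons.1 hz with h | h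
    · exact h ▸ hall p List.mem_cons_self
    · exact hpre z h

-- every L surviving in m2 is ≤ the new mix f1 + 2·f2
theorem mix_ge (q m P m2 : List Int) (f1 f2 : Int)
    (hc : Cert q m) (hm : m = P ++ m2)
    (hf1 : f1 ∈ q ∨ f1 ∈ P) (hf2 : f2 ∈ q ∨ f2 ∈ P) :
    ∀ L ∈ m2, L ≤ f1 + f2 * 2 := by
  intro L hL
  obtain ⟨pre2, post, rfl⟩ := List.append_of_mem hL
  have hdec : m = (P ++ pre2) ++ L :: post := by simp [hm]
  obtain ⟨y, hy, hall, hpre⟩ := cert_split q (P ++ pre2) post L (hdec ▸ hc)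
  have h1 : y ≤ f1 := by
    rcases hf1 with h | h
    · exact hall _ h
    · exact hpre _ (List.mem_append_left _ h)
  have h2 : y ≤ f2 := by
    rcases hf2 with h | h
    · exact hall _ h
    · exact hpre _ (List.mem_append_left _ h)
  omega

-- value of min? on a list whose minimum is known
theorem min?_eq_of_min (h : List Int) (v : Int) (hv : v ∈ h)
    (hmin : ∀ z ∈ h, v ≤ z) : PySem.List.min? h (fun x => x) = some v := by
  have hne : h ≠ [] := List.ne_nil_of_mem hv
  cases hm : PySem.List.min? h (fun x => x) with
  | none => exact absurd ((PySem.List.min?_eq_none_iff h _).1 hm) hne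
  | some m =>
    have hmem : m ∈ h := PySem.List.min?_mem hm
    have h1 : m ≤ v := PySem.List.min?_isMin hm v hv
    have h2 : v ≤ m := hmin m hmem
    have : m = v := le_antisymm h1 h2
    rw [this]

-- characterisation of one front pop
theorem popmin_some (q m : List Int) (f1 : Int) (q1 m1 : List Int)
    (hq : q.Pairwise (· ≤ ·)) (hm : m.Pairwise (· ≤ ·))
    (h : pvPopMin q m = some (f1, q1, m1)) :
    ((q = f1 :: q1 ∧ m1 = m) ∨ (q1 = q ∧ m = f1 :: m1)) ∧
      (∀ z ∈ q ++ m, f1 ≤ z) ∧ q1.Pairwise (· ≤ ·) ∧ m1.Pairwise (· ≤ ·) := by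
  match q, m with
  | [], [] => simp [pvPopMin] at h
  | x :: q', [] =>
    simp only [pvPopMin, Option.some.injEq, Prod.mk.injEq] at h
    obtain ⟨rfl, rfl, rfl⟩ := h
    refine ⟨Or.inl ⟨rfl, rfl⟩, ?_, (List.pairwise_cons.1 hq).2, List.Pairwise.nil⟩
    intro z hz
    rcases List.mem_append.1 hz with hz | hz
    · rcases List.mem_cons.1 hz with h | h
      · omega
      · exact (List.pairwise_cons.1 hq).1 z h
    · cases hz
  | [], y :: m' =>
    simp only [pvPopMin, Option.some.injEq, Prod.mk.injEq] at h
    obtain ⟨rfl, rfl, rfl⟩ := h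
    refine ⟨Or.inr ⟨rfl, rfl⟩, ?_, List.Pairwise.nil, (List.pairwise_cons.1 hm).2⟩
    intro z hz
    rcases List.mem_append.1 hz with hz | hz
    · cases hz
    · rcases List.mem_cons.1 hz with h | h
      · omega
      · exact (List.pairwise_cons.1 hm).1 z h
  | x :: q', y :: m' =>
    simp only [pvPopMin] at h
    split at h <;>
      (rename_i hxy; simp only [Option.some.injEq, Prod.mk.injEq] at h;
       obtain ⟨rfl, rfl, rfl⟩ := h)
    · refine ⟨Or.inl ⟨rfl, rfl⟩, ?_, (List.pairwise_cons.1 hq).2, hm⟩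
      intro z hz
      rcases List.mem_append.1 hz with hz | hz
      · rcases List.mem_cons.1 hz with h | h
        · omega
        · exact (List.pairwise_cons.1 hq).1 z h
      · rcases List.mem_cons.1 hz with h | h
        · omega
        · exact le_trans hxy ((List.pairwise_cons.1 hm).1 z h)
    · refine ⟨Or.inr ⟨rfl, rfl⟩, ?_, hq, (List.pairwise_cons.1 hm).2⟩
      intro z hz
      rcases List.mem_append.1 hz with hz | hz
      · rcases List.mem_cons.1 hz with h | h
        · omega
        · exact le_trans (by omega) ((List.pairwise_cons.1 hq).1 z h)
      · rcases List.mem_cons.1 hz with h | h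
        · omega
        · exact (List.pairwise_cons.1 hm).1 z h

theorem popmin_none (q m : List Int) (h : pvPopMin q m = none) : q = [] ∧ m = [] := by
  match q, m with
  | [], [] => exact ⟨rfl, rfl⟩
  | x :: q', [] => simp [pvPopMin] at h
  | [], y :: m' => simp [pvPopMin] at h
  | x :: q', y :: m' => simp only [pvPopMin] at h; split at h <;> cases h

theorem popmin_perm (q m : List Int) (f1 : Int) (q1 m1 : List Int)
    (hchar : (q = f1 :: q1 ∧ m1 = m) ∨ (q1 = q ∧ m = f1 :: m1)) :
    (q ++ m).Perm (f1 :: (q1 ++ m1)) := by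
  rcases hchar with ⟨rfl, rfl⟩ | ⟨rfl, rfl⟩
  · exact List.Perm.refl _
  · exact List.perm_middle

-- Main invariant: A's heap h and B's two queues hold the same multiset, the
-- queues are sorted, and the mix queue carries its certificate.
theorem loop_eq (n : Nat) : ∀ (h q m : List Int) (K answer : Int),
    h.Perm (q ++ m) → q.Pairwise (· ≤ ·) → m.Pairwise (· ≤ ·) → Cert q m →
    pvLoopA n h K answer = pvLoopB n q m K answer := by
  induction n with
  | zero => intro h q m K answer _ _ _ _; rfl
  | succ n ih =>
    intro h q m K answer hp hq hm hc
    cases hpm : pvPopMin q m with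
    | none =>
      obtain ⟨rfl, rfl⟩ := popmin_none q m hpm
      have : h = [] := hp.eq_nil
      subst this
      simp [pvLoopA, pvLoopB, pvHeappop, PySem.List.min?, hpm]
    | some t =>
      obtain ⟨f1, q1, m1⟩ := t
      obtain ⟨hchar, hmin1, hq1, hm1⟩ := popmin_some q m f1 q1 m1 hq hm hpm
      have hperm1 : (q ++ m).Perm (f1 :: (q1 ++ m1)) := popmin_perm q m f1 q1 m1 hchar
      have hf1h : f1 ∈ h := hp.mem_iff.2 (hperm1.mem_iff.2 List.mem_cons_self)
      have hminh : PySem.List.min? h (fun x => x) = some f1 :=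
        min?_eq_of_min h f1 hf1h (fun z hz => hmin1 z (hp.mem_iff.1 hz))
      have hperase : (h.erase f1).Perm (q1 ++ m1) := by
        have h1 : (h.erase f1).Perm ((f1 :: (q1 ++ m1)).erase f1) :=
          (hp.trans hperm1).erase f1
        simpa using h1
      have hlen : h.length = q.length + m.length := by simpa using hp.length_eq
      simp only [pvLoopA, pvLoopB, pvHeappop, hminh, hpm]
      by_cases hK : f1 < K
      · simp only [if_pos hK, hlen]
        by_cases hlt : q.length + m.length < 2
        · simp [hlt]
        · simp only [if_neg hlt]
          -- second pop
          cases hpm2 : pvPopMin q1 m1 with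
          | none =>
            obtain ⟨rfl, rfl⟩ := popmin_none q1 m1 hpm2
            exfalso
            have := hperm1.length_eq
            simp at this
            omega
          | some t2 =>
            obtain ⟨f2, q2, m2⟩ := t2
            obtain ⟨hchar2, hmin2, hq2, hm2⟩ := popmin_some q1 m1 f2 q2 m2 hq1 hm1 hpm2
            have hperm2 : (q1 ++ m1).Perm (f2 :: (q2 ++ m2)) :=
              popmin_perm q1 m1 f2 q2 m2 hchar2
            have hf2e : f2 ∈ h.erase f1 :=
              hperase.mem_iff.2 (hperm2.mem_iff.2 List.mem_cons_self)
            have hminh2 : PySem.List.min? (h.erase f1) (fun x => x) = some f2 :=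
              min?_eq_of_min _ f2 hf2e (fun z hz => hmin2 z (hperase.mem_iff.1 hz))
            have hperase2 : ((h.erase f1).erase f2).Perm (q2 ++ m2) := by
              have h1 : ((h.erase f1).erase f2).Perm ((f2 :: (q2 ++ m2)).erase f2) :=
                (hperase.trans hperm2).erase f2
              simpa using h1
            simp only [hminh2]
            have hf12 : f1 ≤ f2 := by
              rcases hchar2 with ⟨rfl, rfl⟩ | ⟨rfl, rfl⟩
              · rcases hchar with ⟨rfl, rfl⟩ | ⟨rfl, rfl⟩
                · exact hmin1 f2 (List.mem_append_left _ (List.mem_cons_of_mem _ List.mem_cons_self))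
                · exact hmin1 f2 (List.mem_append_left _ List.mem_cons_self)
              · rcases hchar with ⟨rfl, rfl⟩ | ⟨rfl, rfl⟩
                · exact hmin1 f2 (List.mem_append_right _ List.mem_cons_self)
                · exact hmin1 f2 (List.mem_append_right _ (List.mem_cons_of_mem _ List.mem_cons_self))
            by_cases hmix : f1 + f2 * 2 = 0
            · simp [hmix]
            · simp only [if_neg hmix]
              -- decompose m = P ++ m2 with f1,f2 ∈ q ∪ P in every pop combination
              have hPm : ∃ P : List Int, m = P ++ m2 ∧ (f1 ∈ q ∨ f1 ∈ P) ∧ (f2 ∈ q ∨ f2 ∈ P) := by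
                rcases hchar with ⟨hqe, rfl⟩ | ⟨rfl, hme⟩
                · rcases hchar2 with ⟨hqe2, rfl⟩ | ⟨rfl, hme2⟩
                  · exact ⟨[], by simp, Or.inl (hqe ▸ List.mem_cons_self),
                      Or.inl (hqe ▸ List.mem_cons_of_mem _ (hqe2 ▸ List.mem_cons_self))⟩
                  · exact ⟨[f2], by simp [hme2], Or.inl (hqe ▸ List.mem_cons_self),
                      Or.inr List.mem_cons_self⟩
                · rcases hchar2 with ⟨hqe2, rfl⟩ | ⟨rfl, hme2⟩
                  · exact ⟨[f1], by simp [hme], Or.inr List.mem_cons_self,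
                      Or.inl (hqe2 ▸ List.mem_cons_self)⟩
                  · exact ⟨[f1, f2], by simp [hme, hme2], Or.inr List.mem_cons_self,
                      Or.inr (List.mem_cons_of_mem _ List.mem_cons_self)⟩
              obtain ⟨P, hPdec, hPf1, hPf2⟩ := hPm
              have hle_mix : ∀ L ∈ m2, L ≤ f1 + f2 * 2 :=
                mix_ge q m P m2 f1 f2 hc hPdec hPf1 hPf2
              -- Cert q2 m2, from Cert q m through the two pops
              have hcert2 : Cert q2 m2 := by
                have step : ∀ (q m : List Int) (f : Int) (q' m' : List Int),
                    ((q = f :: q' ∧ m' = m) ∨ (q' = q ∧ m = f :: m')) →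
                    Cert q m → Cert q' m' := by
                  intro q m f q' m' hch hce
                  rcases hch with ⟨rfl, rfl⟩ | ⟨rfl, rfl⟩
                  · exact Cert_mono _ _ _ (fun z hz => List.mem_cons_of_mem _ hz) hce
                  · exact Cert_mono _ _ _ (fun z hz => List.mem_cons_of_mem _ hz) hce.2
                exact step q1 m1 f2 q2 m2 hchar2 (step q m f1 q1 m1 hchar hc)
              have hsorted2 : (m2 ++ [f1 + f2 * 2]).Pairwise (· ≤ ·) := by
                rw [List.pairwise_append]
                exact ⟨hm2, List.pairwise_singleton _ _, by
                  intro a ha b hb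
                  rcases List.mem_singleton.1 hb with rfl
                  exact hle_mix a ha⟩
              have hcert3 : Cert q2 (m2 ++ [f1 + f2 * 2]) := by
                refine Cert_append_one q2 m2 (f1 + f2 * 2) f2 hcert2 (by omega) ?_ ?_
                · intro z hz
                  exact hmin2 z (hperm2.mem_iff.2 (List.mem_cons_of_mem _ (List.mem_append_left _ hz)))
                · intro z hz
                  exact hmin2 z (hperm2.mem_iff.2 (List.mem_cons_of_mem _ (List.mem_append_right _ hz)))
              apply ih
              · refine List.Perm.trans (hperase2.append_right [f1 + f2 * 2]) ?_
                exact (List.append_assoc q2 m2 [f1 + f2 * 2]) ▸ List.Perm.refl _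
              · exact hq2
              · exact hsorted2
              · exact hcert3
      · simp [hK]

-- ===== VERDICT (by name: the statement is the Claim_ definition above) =====
theorem solution_spec : Claim_equal_solution := by
  intro scoville K _ _
  unfold Spec_solution solution solution_alt
  have hperm : scoville.Perm (PySem.List.sorted scoville (fun x => x) false ++ []) := by
    simpa using (PySem.List.sorted_perm scoville (fun x => x) false).symm
  have hlen : scoville.length = (PySem.List.sorted scoville (fun x => x) false).length :=
    (PySem.List.length_sorted scoville (fun x => x) false).symm
  rw [hlen]
  exact loop_eq _ _ _ [] K 0 hperm (PySem.List.sorted_pairwise scoville (fun x => x))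
    List.Pairwise.nil trivial
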